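-- pv_equiv track=rewrite | github.com/denizsincar29/schedule | parsers/mess.py | get_person_info
-- ===== SOURCE A (Python) =====
-- def get_person_info(person_id, data):
--     """
--     Retrieves the information of a person based on their ID from the given data.
--
--     Parameters:
--     - person_id (int): The ID of the person to retrieve the information for.
--     - data (dict): The data containing the people information (returned by the server).
--
--     Returns:
--     - tuple: The type of the person and their information.
--     """
--     # big mess to person's info
--     if "students" in data:
--         person=[per for per in data["students"] if person_id==per["personId"]]  # get the person by id from the students
--         if len(person)==0 and "employees" not in data:
--             raise ValueError("Json is strange! If you put in the person id right from this json, than json is terribly wrong or corrupted.")  # either students or employees must be in the json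
--         if len(person)>0:
--             return "student", person[0]
--         # if len(person)==0, then we need to check the employees
--     if "employees" in data:  # further a student can't pass here
--         person=[per for per in data["employees"] if person_id==per["personId"]]
--         if len(person)==0 and "students" not in data:
--             raise ValueError("Json is strange! If you put in the person id right from this json, than json is terribly wrong or corrupted.")
--         if len(person)>0:
--             return "employee", person[0]  # both can't pass further
--     return None, None  # incorrect id
-- ===== SOURCE B (Python) =====
-- def get_person_info(person_id, data):
--     """Single data-driven loop over the two categories; first matching person wins."""
--     for label, key in (("student", "students"), ("employee", "employees")):
--         for per in data.get(key, ()):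
--             if per["personId"] == person_id:
--                 return label, per
--     return None, None
-- ===== Notes on version B (the rewrite author's own statement) =====
-- stated objective: simpler
-- what changed: Replaces the two duplicated if-blocks (build a full filtered list per category, then branch on its length and on the other key's presence to maybe raise) with one data-driven loop over (label, key) pairs that short-circuits on the first matching person and simply returns (None, None) when nothing matches; the ValueError machinery is dropped (those inputs are outside Pre_).
import Mathlib
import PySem

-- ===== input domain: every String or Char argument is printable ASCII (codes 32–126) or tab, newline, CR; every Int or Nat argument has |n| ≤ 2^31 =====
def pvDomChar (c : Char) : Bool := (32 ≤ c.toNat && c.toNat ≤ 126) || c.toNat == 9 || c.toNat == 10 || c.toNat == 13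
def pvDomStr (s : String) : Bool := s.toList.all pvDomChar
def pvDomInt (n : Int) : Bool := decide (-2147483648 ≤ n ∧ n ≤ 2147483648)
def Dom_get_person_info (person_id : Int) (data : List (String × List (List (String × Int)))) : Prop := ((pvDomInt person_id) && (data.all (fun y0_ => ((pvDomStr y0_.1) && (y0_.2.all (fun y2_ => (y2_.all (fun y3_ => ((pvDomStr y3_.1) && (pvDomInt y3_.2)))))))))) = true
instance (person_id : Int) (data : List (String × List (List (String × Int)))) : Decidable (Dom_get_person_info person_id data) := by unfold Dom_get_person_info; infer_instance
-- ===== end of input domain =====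

-- B replaces A's duplicated per-category blocks by one loop over (label, key) pairs (simpler; same cost).


-- ===== PORT A =====
-- shared Python-dict primitives: d[k] / d.get(k) as first-match lookup on the association list
def pvLookup (data : List (String × List (List (String × Int)))) (key : String) :
    Option (List (List (String × Int))) :=
  (data.find? (fun kv => kv.1 == key)).map (·.2)

-- per["personId"]: Option-valued; `none` is Python's KeyError (such inputs are outside Pre_)
def pvPersonId (per : List (String × Int)) : Option Int :=
  (per.find? (fun kv => kv.1 == "personId")).map (·.2)

-- the second `if "employees" in data:` block of A
def gpiA_employees (person_id : Int) (data : List (String × List (List (String × Int)))) :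
    Option String × (Option (List (String × Int))) :=
  match pvLookup data "employees" with
  | some emps =>
    let person := emps.filter (fun per => pvPersonId per == some person_id)
    -- Python raises ValueError here; excluded by Pre_, placeholder value
    if person.length == 0 && (pvLookup data "students").isNone then (none, none)
    else
      match person with
      | p :: _ => (some "employee", some p)
      | [] => (none, none)
  | none => (none, none)

def get_person_info (person_id : Int) (data : List (String × List (List (String × Int)))) : Option String × (Option (List (String × Int))) :=
  match pvLookup data "students" with
  | some studs =>
    let person := studs.filter (fun per => pvPersonId per == some person_id)
    -- Python raises ValueError here; excluded by Pre_, placeholder value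
    if person.length == 0 && (pvLookup data "employees").isNone then (none, none)
    else
      match person with
      | p :: _ => (some "student", some p)
      | [] => gpiA_employees person_id data
  | none => gpiA_employees person_id data

-- ===== PORT B =====
-- B: one loop over (label, key) pairs, short-circuiting on the first matching person
def gpiB_loop (person_id : Int) (data : List (String × List (List (String × Int)))) :
    List (String × String) → Option String × (Option (List (String × Int)))
  | [] => (none, none)
  | (label, key) :: rest =>
    match ((pvLookup data key).getD []).find? (fun per => pvPersonId per == some person_id) with
    | some per => (some label, some per)
    | none => gpiB_loop person_id data rest

def get_person_info_alt (person_id : Int) (data : List (String × List (List (String × Int)))) : Option String × (Option (List (String × Int))) :=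
  gpiB_loop person_id data [("student", "students"), ("employee", "employees")]

-- ===== PRECONDITION & SPEC =====
-- Pre_ excludes exactly the inputs where Python A raises: a KeyError (a scanned person dict
-- without a "personId" key) or the ValueError (exactly one of the two category keys present
-- and no person in it matches person_id). A returns no value on any excluded input.
def pvAllIds (l : List (List (String × Int))) : Prop :=
  ∀ per ∈ l, (pvPersonId per).isSome = true

def pvHasMatch (person_id : Int) (l : List (List (String × Int))) : Prop :=
  ∃ per ∈ l, pvPersonId per = some person_id

def Pre_get_person_info (person_id : Int) (data : List (String × List (List (String × Int)))) : Prop :=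
  pvAllIds ((pvLookup data "students").getD []) ∧
  ((pvLookup data "students").isSome = true ∧ pvLookup data "employees" = none →
    pvHasMatch person_id ((pvLookup data "students").getD [])) ∧
  ((pvLookup data "students").isSome = true ∧ (pvLookup data "employees").isSome = true ∧
      ¬ pvHasMatch person_id ((pvLookup data "students").getD []) →
    pvAllIds ((pvLookup data "employees").getD [])) ∧
  (pvLookup data "students" = none ∧ (pvLookup data "employees").isSome = true →
    pvAllIds ((pvLookup data "employees").getD []) ∧
      pvHasMatch person_id ((pvLookup data "employees").getD []))

instance (person_id : Int) (data : List (String × List (List (String × Int)))) : Decidable (Pre_get_person_info person_id data) := by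
  unfold Pre_get_person_info pvAllIds pvHasMatch; infer_instance

def pvWitness_get_person_info : Int × (List (String × List (List (String × Int)))) :=
  (1, [("students", [[("personId", 1)]]), ("employees", [])])

def Spec_get_person_info (person_id : Int) (data : List (String × List (List (String × Int)))) (out : Option String × (Option (List (String × Int)))) : Prop := out = get_person_info_alt person_id data
instance (person_id : Int) (data : List (String × List (List (String × Int)))) (out : Option String × (Option (List (String × Int)))) : Decidable (Spec_get_person_info person_id data out) := by unfold Spec_get_person_info; infer_instance

-- ===== CLAIM (what is proved, stated in full; the proofs are below) =====
def Claim_equal_get_person_info : Prop := ∀ (person_id : Int) (data : List (String × List (List (String × Int)))), Dom_get_person_info person_id data → Pre_get_person_info person_id data → Spec_get_person_info person_id data (get_person_info person_id data)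

-- ===== LEMMAS AND PROOFS =====
lemma pvFind?_of_filter {A : Type} {p : A → Bool} {l r : List A}
    (h : l.filter p = r) : l.find? p = r.head? := by
  rw [← List.head?_filter, h]

-- ===== VERDICT (by name: the statement is the Claim_ definition above) =====
theorem get_person_info_spec : Claim_equal_get_person_info := by
  intro pid data _ _
  unfold Spec_get_person_info get_person_info get_person_info_alt
  cases hS : pvLookup data "students" with
  | none =>
    cases hE : pvLookup data "employees" with
    | none => simp [gpiA_employees, gpiB_loop, hS, hE]
    | some emps =>
      cases hF : emps.filter (fun per => pvPersonId per == some pid) with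
      | nil => simp [gpiA_employees, gpiB_loop, hS, hE, hF, pvFind?_of_filter hF]
      | cons p t => simp [gpiA_employees, gpiB_loop, hS, hE, hF, pvFind?_of_filter hF]
  | some studs =>
    cases hF : studs.filter (fun per => pvPersonId per == some pid) with
    | cons p t => simp [gpiB_loop, hS, hF, pvFind?_of_filter hF]
    | nil =>
      cases hE : pvLookup data "employees" with
      | none =>
        -- ValueError path of A, excluded by Pre_; both ports return (none, none)
        simp [gpiB_loop, hS, hE, hF, pvFind?_of_filter hF]
      | some emps =>
        cases hF2 : emps.filter (fun per => pvPersonId per == some pid) with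
        | nil =>
          simp [gpiA_employees, gpiB_loop, hS, hE, hF, hF2, pvFind?_of_filter hF,
            pvFind?_of_filter hF2]
        | cons p t =>
          simp [gpiA_employees, gpiB_loop, hS, hE, hF, hF2, pvFind?_of_filter hF,
            pvFind?_of_filter hF2]
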